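-- pv_equiv track=rewrite | github.com/SPRIME01/homelab-ai | home-assistant/notifications/notification_service.py | _group_related_events
-- ===== SOURCE A (Python) =====
-- from typing import Dict, List, Any
--
-- def _group_related_events(events: List[Dict[str, Any]]) -> Dict[str, List[Dict[str, Any]]]:
--     """Group related events together based on entity_id or domain"""
--     groups = {}
--
--     for event in events:
--         # Create a simple grouping key
--         if "entity_id" in event:
--             key = event["entity_id"].split(".")[0]  # Use domain as key
--         else:
--             key = event.get("domain", "default")
--
--         if key not in groups:
--             groups[key] = []
--
--         groups[key].append(event)
--
--     return groups
-- ===== SOURCE B (Python) =====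
-- def _key(event):
--     if "entity_id" in event:
--         return event["entity_id"].split(".")[0]
--     return event.get("domain", "default")
--
--
-- def _group_related_events(events):
--     """Group related events together based on entity_id or domain"""
--     keys = dict.fromkeys(map(_key, events))  # distinct keys, first-appearance order
--     return {k: [e for e in events if _key(e) == k] for k in keys}
-- ===== Notes on version B (the rewrite author's own statement) =====
-- stated objective: alternative
-- what changed: Replaces A's single-pass incremental dict-of-buckets (check membership, create empty bucket, append) with a two-phase comprehension: first dedup the mapped keys in first-appearance order, then build each group by filtering the whole event list per key.
import Mathlib
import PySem

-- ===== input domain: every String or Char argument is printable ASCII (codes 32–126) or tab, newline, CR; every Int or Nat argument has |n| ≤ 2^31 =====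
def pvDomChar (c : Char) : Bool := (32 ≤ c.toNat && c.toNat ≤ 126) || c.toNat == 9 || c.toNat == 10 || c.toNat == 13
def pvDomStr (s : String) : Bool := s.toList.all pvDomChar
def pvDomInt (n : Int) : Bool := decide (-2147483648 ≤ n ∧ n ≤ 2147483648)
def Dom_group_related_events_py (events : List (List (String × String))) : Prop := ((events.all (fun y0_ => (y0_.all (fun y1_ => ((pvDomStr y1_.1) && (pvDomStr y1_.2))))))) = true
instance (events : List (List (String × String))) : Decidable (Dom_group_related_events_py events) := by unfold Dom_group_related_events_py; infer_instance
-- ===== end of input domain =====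

-- B replaces A's single-pass incremental bucket dict with dedup-keys + per-key filter; same return value.
-- ===== PORT A =====
-- shared key extraction (identical helper logic in Source A and Source B)
def pvKeyOf (event : List (String × String)) : String :=
  let d := PySem.Dict.ofList event
  match d.get? "entity_id" with
  | some v => ((PySem.Str.split? v ".").getD []).headD ""
  | none => d.getD "domain" "default"

def group_related_events_py (events : List (List (String × String))) : List (String × List (List (String × String))) :=
  (events.foldl (fun groups event =>
      let key := pvKeyOf event
      let groups := if groups.contains key then groups
                    else groups.insert key ([] : List (List (String × String)))
      groups.modify key [] (fun l => l ++ [event]))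
    PySem.Dict.empty).items

-- ===== PORT B =====
def group_related_events_py_alt (events : List (List (String × String))) : List (String × List (List (String × String))) :=
  (PySem.List.dedup (events.map pvKeyOf)).map
    (fun k => (k, events.filter (fun e => pvKeyOf e == k)))

-- ===== PRECONDITION & SPEC =====
def Spec_group_related_events_py (events : List (List (String × String))) (out : List (String × List (List (String × String)))) : Prop := out = group_related_events_py_alt events
instance (events : List (List (String × String))) (out : List (String × List (List (String × String)))) : Decidable (Spec_group_related_events_py events out) := by unfold Spec_group_related_events_py; infer_instance

-- ===== CLAIM (what is proved, stated in full; the proofs are below) =====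
def Claim_equal_group_related_events_py : Prop := ∀ (events : List (List (String × String))), Dom_group_related_events_py events → Spec_group_related_events_py events (group_related_events_py events)

-- ===== LEMMAS AND PROOFS =====
-- A's loop body: the "create empty bucket then append" step is one modify
theorem pvStepA_eq_modify (g : PySem.Dict String (List (List (String × String))))
    (key : String) (e : List (String × String)) :
    ((if g.contains key then g else g.insert key ([] : List (List (String × String)))).modify key []
        (fun l => l ++ [e]))
      = g.modify key [] (fun l => l ++ [e]) := by
  by_cases h : g.contains key = true
  · simp [h]
  · simp only [h, if_neg, Bool.not_eq_true]
    have hmod : ∀ (d : PySem.Dict String (List (List (String × String)))),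
        d.modify key [] (fun l => l ++ [e]) = d.insert key (d.getD key [] ++ [e]) :=
      fun d => PySem.Dict.ext_iff.mpr rfl
    rw [hmod, hmod, PySem.Dict.getD_insert_self, PySem.Dict.insert_insert_self,
      PySem.Dict.getD_of_not_contains _ _ (by simpa using h)]

theorem pvFoldA_eq (events : List (List (String × String))) :
    (events.foldl (fun groups event =>
        let key := pvKeyOf event
        let groups := if groups.contains key then groups
                      else groups.insert key ([] : List (List (String × String)))
        groups.modify key [] (fun l => l ++ [event]))
      PySem.Dict.empty)
      = (events.map (fun e => (pvKeyOf e, e))).foldl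
          (fun d p => d.modify p.1 [] (fun l => l ++ [p.2])) PySem.Dict.empty := by
  rw [List.foldl_map]
  exact PySem.List.foldl_congr_mem _ _ _ _ (fun g e _ => pvStepA_eq_modify g (pvKeyOf e) e)

-- ===== VERDICT (by name: the statement is the Claim_ definition above) =====
theorem group_related_events_py_spec : Claim_equal_group_related_events_py := by
  intro events _
  unfold Spec_group_related_events_py group_related_events_py group_related_events_py_alt
  rw [pvFoldA_eq]
  set l := events.map (fun e => (pvKeyOf e, e)) with hl
  have hnd : ((l.foldl (fun d p => d.modify p.1 [] (fun x => x ++ [p.2])) PySem.Dict.empty)).keys.Nodup :=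
    PySem.Dict.nodup_keys_foldl_modify_key l (fun p => p.1) [] (fun _ p => fun x => x ++ [p.2]) _
      (by simp)
  rw [PySem.Dict.items_eq_map_keys _ hnd []]
  have hkeys : ((l.foldl (fun d p => d.modify p.1 [] (fun x => x ++ [p.2])) PySem.Dict.empty)).keys
      = PySem.List.dedup (events.map pvKeyOf) := by
    rw [PySem.Dict.keys_foldl_modify_key l (fun p => p.1) [] (fun _ p => fun x => x ++ [p.2])]
    rw [PySem.List.dedup_eq_ofList, ← PySem.Set.update_empty]
    simp only [hl, List.map_map]
    simp [PySem.Set.empty, PySem.Dict.keys_empty, Function.comp_def]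
  rw [hkeys]
  apply List.map_congr_left
  intro k _
  have hg := PySem.Dict.getD_foldl_modify_append l PySem.Dict.empty k
  rw [hg, PySem.Dict.getD_empty]
  simp only [hl, List.filter_map, List.map_map]
  simp [Function.comp_def]
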